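-- pv_equiv track=rewrite | github.com/Bieslaw/Nim_Misere | mcts.py | optimal_nim_move
-- ===== SOURCE A (Python) =====
-- from typing import List, Tuple, Dict, Optional
--
-- def optimal_nim_move(state: List[int]) -> Tuple[int, int]:
--     """
--     Calculate the optimal move for Misère Nim using nim-sum strategy
--     This function works for the special case where there are no heaps of size 1
--
--     Args:
--         state: List of integers representing the number of items in each stack
--
--     Returns:
--         Tuple of (which_stack, how_many_to_take)
--     """
--     # Calculate nim-sum of all stacks
--     nim_sum = 0
--     for stack in state:
--         nim_sum ^= stack
--
--     # Count stacks of size 1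
--     ones_count = state.count(1)
--
--     # Check if we're in an endgame situation (only stacks of size 1 remain)
--     non_ones = [s for s in state if s > 1]
--     if not non_ones:
--         # In endgame with only 1s, we want odd number of 1s to win
--         if ones_count % 2 == 1:
--             # Take the last one if odd number of 1s
--             idx = state.index(1)
--             return (idx, 1)
--         else:
--             # Take the last one if even number of 1s
--             idx = state.index(1)
--             return (idx, 1)
--
--     # Normal play
--     for i, stack in enumerate(state):
--         if stack > 1:  # Skip stacks of size 1 in regular play
--             # Calculate how many to take to get the best nim-sum
--             for take in range(1, stack + 1):
--                 new_stack = stack - take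
--                 new_nim_sum = nim_sum ^ stack ^ new_stack
--
--                 if new_nim_sum == 0:
--                     # This is good unless it leaves only 1s
--                     new_state = state.copy()
--                     new_state[i] = new_stack
--                     if sum(1 for s in new_state if s > 1) == 0:
--                         # If this leaves only 1s, ensure odd count for misère win
--                         ones_in_new = sum(1 for s in new_state if s == 1)
--                         if ones_in_new % 2 == 0:
--                             return (i, take)
--                     else:
--                         return (i, take)
--
--     # If no winning move, just take 1 from the largest stack
--     max_stack_idx = state.index(max(state))
--     return (max_stack_idx, 1)
-- ===== SOURCE B (Python) =====
-- from typing import List, Tuple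
--
--
-- def optimal_nim_move(state: List[int]) -> Tuple[int, int]:
--     """Misère Nim move via direct nim-sum arithmetic: instead of scanning every
--     possible take for every stack, the unique winning take for a stack is
--     stack - (nim_sum ^ stack), computed in O(1) per stack."""
--     nim_sum = 0
--     for s in state:
--         nim_sum ^= s
--     gt1 = sum(1 for s in state if s > 1)
--     if gt1 == 0:
--         # endgame: only stacks <= 1 remain; take the first 1
--         return (state.index(1), 1)
--     ones = state.count(1)
--     for i, stack in enumerate(state):
--         if stack > 1:
--             target = nim_sum ^ stack
--             if 0 <= target < stack:
--                 # taking stack - target zeroes the nim-sum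
--                 if gt1 > 1 or target > 1:
--                     return (i, stack - target)
--                 # the move would leave only 0s and 1s
--                 if (ones + (1 if target == 1 else 0)) % 2 == 0:
--                     return (i, stack - target)
--     m = max(state)
--     return (state.index(m), 1)
-- ===== Notes on version B (the rewrite author's own statement) =====
-- stated objective: faster
-- what changed: B replaces A's inner scan over every take in range(1, stack+1) by the direct computation take = stack - (nim_sum ^ stack) (at most one candidate per stack), and replaces A's per-candidate new_state copy-and-recount by counts of stacks >1 and of 1s precomputed once.
-- outside the precondition, e.g. on optimal_nim_move([0, 0]): A raises ValueError, B raises ValueError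
import Mathlib
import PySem

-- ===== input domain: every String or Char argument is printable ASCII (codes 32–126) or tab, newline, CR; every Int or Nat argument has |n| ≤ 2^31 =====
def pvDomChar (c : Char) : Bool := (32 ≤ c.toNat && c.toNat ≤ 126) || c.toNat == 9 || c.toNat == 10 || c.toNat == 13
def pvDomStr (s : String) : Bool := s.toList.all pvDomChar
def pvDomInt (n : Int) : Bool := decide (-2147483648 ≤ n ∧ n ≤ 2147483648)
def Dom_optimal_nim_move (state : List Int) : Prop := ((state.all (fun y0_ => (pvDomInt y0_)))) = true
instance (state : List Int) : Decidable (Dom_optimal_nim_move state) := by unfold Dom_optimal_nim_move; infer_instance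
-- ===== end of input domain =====

-- B replaces A's inner scan over every possible take (O(max_heap) per stack) by the direct
-- computation take = stack - (nim_sum ^ stack) and by counts precomputed once: objective = faster.

-- ===== PORT A =====
-- inner loop 'for take in range(1, stack+1): …' with early return
def pvATakes (state : List Int) (nim_sum : Int) (i stack : Int) : List Int → Option (Int × Int)
  | [] => none
  | take :: rest =>
    let new_stack := stack - take
    let new_nim_sum := PySem.Int.bxor (PySem.Int.bxor nim_sum stack) new_stack
    if new_nim_sum = 0 then
      let new_state := PySem.List.pySetD state i new_stack
      if ((new_state.map (fun s => if 1 < s then (1 : Int) else 0)).sum) = 0 then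
        if PySem.Int.mod ((new_state.map (fun s => if s = 1 then (1 : Int) else 0)).sum) 2 = 0 then
          some (i, take)
        else pvATakes state nim_sum i stack rest
      else some (i, take)
    else pvATakes state nim_sum i stack rest

-- outer loop 'for i, stack in enumerate(state): if stack > 1: …'
def pvAOuter (state : List Int) (nim_sum : Int) : List (Int × Int) → Option (Int × Int)
  | [] => none
  | (i, stack) :: rest =>
    if 1 < stack then
      match pvATakes state nim_sum i stack (PySem.List.pyRange 1 (stack + 1) 1) with
      | some r => some r
      | none => pvAOuter state nim_sum rest
    else pvAOuter state nim_sum rest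

def optimal_nim_move (state : List Int) : Int × Int :=
  let nim_sum := state.foldl (fun a s => PySem.Int.bxor a s) 0
  let ones_count := PySem.List.count state 1
  let non_ones := state.filter (fun s => 1 < s)
  if non_ones = [] then
    -- state.index(1) raises ValueError when 1 ∉ state: excluded by Pre_
    if PySem.Int.mod (ones_count : Int) 2 = 1 then
      (((PySem.List.index? state 1).getD 0 : Nat), 1)
    else
      (((PySem.List.index? state 1).getD 0 : Nat), 1)
  else
    match pvAOuter state nim_sum (PySem.List.enumerate state) with
    | some r => r
    | none =>
      match PySem.List.max? state (fun x => x) with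
      | some m => (((PySem.List.index? state m).getD 0 : Nat), 1)
      | none => (0, 1)  -- unreachable: state ≠ [] in this branch

-- ===== PORT B =====
-- single pass: the only candidate take for a stack is stack - (nim_sum ^ stack)
def pvBLoop (gt1 : Int) (ones : Nat) (nim_sum : Int) : List (Int × Int) → Option (Int × Int)
  | [] => none
  | (i, stack) :: rest =>
    if 1 < stack then
      let target := PySem.Int.bxor nim_sum stack
      if 0 ≤ target ∧ target < stack then
        if 1 < gt1 ∨ 1 < target then some (i, stack - target)
        else if PySem.Int.mod ((ones : Int) + (if target = 1 then 1 else 0)) 2 = 0 then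
          some (i, stack - target)
        else pvBLoop gt1 ones nim_sum rest
      else pvBLoop gt1 ones nim_sum rest
    else pvBLoop gt1 ones nim_sum rest

def optimal_nim_move_alt (state : List Int) : Int × Int :=
  let nim_sum := state.foldl (fun a s => PySem.Int.bxor a s) 0
  let gt1 := (state.map (fun s => if 1 < s then (1 : Int) else 0)).sum
  if gt1 = 0 then
    (((PySem.List.index? state 1).getD 0 : Nat), 1)
  else
    let ones := PySem.List.count state 1
    match pvBLoop gt1 ones nim_sum (PySem.List.enumerate state) with
    | some r => r
    | none =>
      match PySem.List.max? state (fun x => x) with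
      | some m => (((PySem.List.index? state m).getD 0 : Nat), 1)
      | none => (0, 1)

-- ===== PRECONDITION & SPEC =====
-- Pre_ excludes exactly the inputs on which A raises ValueError (state.index(1) with no 1
-- and no stack > 1, including the empty list); B raises the same ValueError there.
def Pre_optimal_nim_move (state : List Int) : Prop := (1 : Int) ∈ state ∨ ∃ s ∈ state, 1 < s
instance (state : List Int) : Decidable (Pre_optimal_nim_move state) := by unfold Pre_optimal_nim_move; infer_instance
def pvWitness_optimal_nim_move : List Int := ([3, 4, 5] : List Int)

def Spec_optimal_nim_move (state : List Int) (out : Int × Int) : Prop := out = optimal_nim_move_alt state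
instance (state : List Int) (out : Int × Int) : Decidable (Spec_optimal_nim_move state out) := by unfold Spec_optimal_nim_move; infer_instance

-- ===== CLAIM (what is proved, stated in full; the proofs are below) =====
def Claim_equal_optimal_nim_move : Prop := ∀ (state : List Int), Dom_optimal_nim_move state → Pre_optimal_nim_move state → Spec_optimal_nim_move state (optimal_nim_move state)

-- ===== LEMMAS AND PROOFS =====

-- Python ^ cancels: a ^ b == 0 iff a == b
theorem pv_bxor_eq_zero_iff (a b : Int) : PySem.Int.bxor a b = 0 ↔ a = b := by
  unfold PySem.Int.bxor
  split_ifs with h1 h2 h2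
  · rw [show ((a.toNat ^^^ b.toNat : Nat) : Int) = 0 ↔ (a.toNat ^^^ b.toNat : Nat) = 0 by omega,
        Nat.xor_eq_zero_iff]
    omega
  · constructor
    · intro h; omega
    · intro h; exact absurd (h ▸ h1) h2
  · constructor
    · intro h; omega
    · intro h; exact absurd (h ▸ h2) h1
  · rw [show (((-a-1).toNat ^^^ (-b-1).toNat : Nat) : Int) = 0 ↔ ((-a-1).toNat ^^^ (-b-1).toNat : Nat) = 0 by omega,
        Nat.xor_eq_zero_iff]
    omega

-- the value A's inner loop yields at the unique winning take (helper for the proofs)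
def pvF (state : List Int) (_ns i stack take : Int) : Option (Int × Int) :=
  let new_state := PySem.List.pySetD state i (stack - take)
  if ((new_state.map (fun s => if 1 < s then (1 : Int) else 0)).sum) = 0 then
    if PySem.Int.mod ((new_state.map (fun s => if s = 1 then (1 : Int) else 0)).sum) 2 = 0 then
      some (i, take)
    else none
  else some (i, take)

theorem pv_takes_eq (state : List Int) (ns i stack : Int) (L : List Int) :
    pvATakes state ns i stack L =
      if (stack - PySem.Int.bxor ns stack) ∈ L then
        pvF state ns i stack (stack - PySem.Int.bxor ns stack)
      else none := by
  induction L with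
  | nil => simp [pvATakes]
  | cons take rest ih =>
    by_cases hc : take = stack - PySem.Int.bxor ns stack
    · subst hc
      have hz : PySem.Int.bxor (PySem.Int.bxor ns stack) (stack - (stack - PySem.Int.bxor ns stack)) = 0 := by
        rw [show stack - (stack - PySem.Int.bxor ns stack) = PySem.Int.bxor ns stack from by ring]
        exact (pv_bxor_eq_zero_iff _ _).mpr rfl
      rw [if_pos (List.mem_cons_self)]
      have e : stack - (stack - PySem.Int.bxor ns stack) = PySem.Int.bxor ns stack := by ring
      simp only [pvATakes]
      rw [if_pos hz]
      simp only [pvF, e]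
      split_ifs with hsum hmod
      · rfl
      · rw [ih]
        by_cases hmem : stack - PySem.Int.bxor ns stack ∈ rest
        · rw [if_pos hmem]
          simp only [pvF, e]
          rw [if_pos hsum, if_neg hmod]
        · rw [if_neg hmem]
      · rfl
    · have hz : ¬ (PySem.Int.bxor (PySem.Int.bxor ns stack) (stack - take) = 0) := by
        rw [pv_bxor_eq_zero_iff]; omega
      simp only [pvATakes, hz, if_false, List.mem_cons]
      rw [ih]
      by_cases hmem : stack - PySem.Int.bxor ns stack ∈ rest
      · rw [if_pos hmem, if_pos (Or.inr hmem)]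
      · rw [if_neg hmem, if_neg (by
          rintro (h | h)
          · exact hc h.symm
          · exact hmem h)]

theorem pv_sum_map_set (f : Int → Int) (xs : List Int) (k : Nat) (v : Int) (h : k < xs.length) :
    ((xs.set k v).map f).sum = (xs.map f).sum - f (xs[k]) + f v := by
  induction xs generalizing k with
  | nil => simp at h
  | cons x t ih =>
    cases k with
    | zero => simp [List.set]; ring
    | succ k =>
      simp only [List.set, List.map, List.sum_cons, List.getElem_cons_succ]
      rw [ih k (by simpa using h)]
      ring

theorem pv_sum_ite_nonneg (p : Int → Prop) [DecidablePred p] (xs : List Int) :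
    0 ≤ (xs.map (fun s => if p s then (1 : Int) else 0)).sum := by
  induction xs with
  | nil => simp
  | cons x t ih => simp only [List.map, List.sum_cons]; split <;> omega

theorem pv_sum_ite_eq_zero (p : Int → Prop) [DecidablePred p] (xs : List Int) :
    (xs.map (fun s => if p s then (1 : Int) else 0)).sum = 0 ↔ ∀ s ∈ xs, ¬ p s := by
  induction xs with
  | nil => simp
  | cons x t ih =>
    have := pv_sum_ite_nonneg p t
    simp only [List.map, List.sum_cons, List.mem_cons]
    constructor
    · intro h
      split at h
      · omega
      · intro s hs
        rcases hs with rfl | hs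
        · assumption
        · exact (ih.mp (by omega)) s hs
    · intro h
      rw [if_neg (h x (Or.inl rfl)), ih.mpr (fun s hs => h s (Or.inr hs))]
      ring

theorem pv_sum_ite_le (p : Int → Prop) [DecidablePred p] (xs : List Int) (k : Nat) (h : k < xs.length) :
    (if p xs[k] then (1 : Int) else 0) ≤ (xs.map (fun s => if p s then (1 : Int) else 0)).sum := by
  induction xs generalizing k with
  | nil => simp at h
  | cons x t ih =>
    have := pv_sum_ite_nonneg p t
    cases k with
    | zero =>
      simp only [List.getElem_cons_zero, List.map, List.sum_cons]
      split <;> omega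
    | succ k =>
      simp only [List.getElem_cons_succ, List.map, List.sum_cons]
      have h2 := ih k (by simpa using h)
      have h3 : (0:Int) ≤ if p x then (1:Int) else 0 := by split <;> omega
      exact le_trans h2 (le_add_of_nonneg_left h3)

theorem pv_ones_sum (xs : List Int) :
    (xs.map (fun s => if s = 1 then (1 : Int) else 0)).sum = ((PySem.List.count xs 1 : Nat) : Int) := by
  rw [PySem.List.count_eq]
  induction xs with
  | nil => simp
  | cons x t ih =>
    simp only [List.map, List.sum_cons, List.count_cons, ih]
    by_cases hx : x = 1
    · simp [hx]; omega
    · simp [hx]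

theorem pv_loops_eq (state : List Int) (ns : Int) (l : List (Int × Int))
    (hl : ∀ p ∈ l, ∃ k : Nat, ∃ hk : k < state.length, p = ((k : Int), state[k])) :
    pvAOuter state ns l =
      pvBLoop ((state.map (fun s => if 1 < s then (1 : Int) else 0)).sum) (PySem.List.count state 1) ns l := by
  induction l with
  | nil => rfl
  | cons q rest ih =>
    obtain ⟨k, hk, rfl⟩ := hl q (List.mem_cons_self)
    have ih' := ih (fun q hq => hl q (List.mem_cons_of_mem _ hq))
    by_cases hs : 1 < state[k]
    · simp only [pvAOuter, pvBLoop, if_pos hs]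
      rw [pv_takes_eq]
      by_cases hcond : 0 ≤ PySem.Int.bxor ns state[k] ∧ PySem.Int.bxor ns state[k] < state[k]
      · rw [if_pos (by rw [PySem.List.mem_pyRange_one]; omega)]
        rw [if_pos hcond]
        have e : state[k] - (state[k] - PySem.Int.bxor ns state[k]) = PySem.Int.bxor ns state[k] := by ring
        have hsum1 := pv_sum_map_set (fun s => if 1 < s then (1 : Int) else 0) state k
          (PySem.Int.bxor ns state[k]) hk
        have hSge := pv_sum_ite_le (fun s => 1 < s) state k hk
        rw [if_pos hs] at hSge
        simp only [if_pos hs] at hsum1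
        have hones : (List.map (fun s => if s = 1 then (1 : Int) else 0)
            (state.set k (PySem.Int.bxor ns state[k]))).sum =
            ((PySem.List.count state 1 : Nat) : Int) + (if PySem.Int.bxor ns state[k] = 1 then 1 else 0) := by
          rw [pv_sum_map_set _ state k _ hk, if_neg (by omega : ¬ state[k] = 1), pv_ones_sum state]
          ring
        simp only [pvF, e, PySem.List.pySetD_natCast]
        by_cases hb1 : 1 < (state.map (fun s => if 1 < s then (1 : Int) else 0)).sum ∨ 1 < PySem.Int.bxor ns state[k]
        · rw [if_pos hb1]
          rw [if_neg (by
            rw [hsum1]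
            rcases hb1 with hb | hb
            · have h3 : (0:Int) ≤ if 1 < PySem.Int.bxor ns state[k] then (1:Int) else 0 := by split <;> omega
              omega
            · rw [if_pos hb]; omega)]
        · rw [if_neg hb1]
          rw [if_pos (by
            rw [hsum1, if_neg (by omega : ¬ 1 < PySem.Int.bxor ns state[k])]
            omega)]
          rw [hones]
          split_ifs <;> first | rfl | exact ih'
      · rw [if_neg (by rw [PySem.List.mem_pyRange_one]; omega)]
        rw [if_neg hcond]
        exact ih'
    · simp only [pvAOuter, pvBLoop, if_neg hs]
      exact ih'

-- ===== VERDICT (by name: the statement is the Claim_ definition above) =====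
theorem optimal_nim_move_spec : Claim_equal_optimal_nim_move := by
  intro state hdom hpre
  unfold Spec_optimal_nim_move
  simp only [optimal_nim_move, optimal_nim_move_alt]
  have hfe : (state.filter (fun s => decide (1 < s)) = []) ↔
      ((state.map (fun s => if 1 < s then (1 : Int) else 0)).sum = 0) := by
    rw [pv_sum_ite_eq_zero, List.filter_eq_nil_iff]
    simp
  by_cases hend : (state.map (fun s => if 1 < s then (1 : Int) else 0)).sum = 0
  · rw [if_pos (hfe.mpr hend), if_pos hend]
    split_ifs <;> rfl
  · rw [if_neg (fun h => hend (hfe.mp h)), if_neg hend]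
    rw [pv_loops_eq state _ (PySem.List.enumerate state) (by
      intro p hp
      rw [PySem.List.mem_enumerate_iff] at hp
      obtain ⟨k, h, hpk⟩ := hp
      exact ⟨k, h, by simpa using hpk⟩)]
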